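-- pv_equiv track=rewrite | github.com/nev3rfail/telegram-nanobot | helpers/sanitize.py | sanitize_md
-- ===== SOURCE A (Python) =====
-- def sanitize_md(txt):
--     to_sanitize = ["_", "*", "`"]
--     for char in to_sanitize:
--         if txt.count(char) % 2:
--             pos = txt.rfind(char)
--             if pos > -1:
--                 txt = txt[:pos] + txt[pos:].replace(char, "\\" + char)
--     return txt
-- ===== SOURCE B (Python) =====
-- def sanitize_md(txt):
--     esc = {txt.rfind(c) for c in "_*`" if txt.count(c) % 2}
--     return "".join("\\" + ch if i in esc else ch for i, ch in enumerate(txt))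
-- ===== Notes on version B (the rewrite author's own statement) =====
-- stated objective: simpler
-- what changed: Instead of three sequential count+rfind+slice-and-replace rewrite passes that each rebuild the string, B first collects the set of original indices to escape (rfind of each delimiter with odd count) and then rebuilds the string in one enumerate pass, prepending a backslash at exactly those indices.
import Mathlib
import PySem

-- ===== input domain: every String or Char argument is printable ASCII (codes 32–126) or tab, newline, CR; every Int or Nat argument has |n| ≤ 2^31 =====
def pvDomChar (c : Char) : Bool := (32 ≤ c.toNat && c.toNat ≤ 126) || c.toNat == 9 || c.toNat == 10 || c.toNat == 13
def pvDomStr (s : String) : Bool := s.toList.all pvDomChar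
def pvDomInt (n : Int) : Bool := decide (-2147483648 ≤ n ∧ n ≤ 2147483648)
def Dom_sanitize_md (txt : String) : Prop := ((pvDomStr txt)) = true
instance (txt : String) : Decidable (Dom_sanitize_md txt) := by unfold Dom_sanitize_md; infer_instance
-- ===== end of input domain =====

-- B replaces A's three sequential count+rfind+slice/replace rewrite passes with one set of
-- escape indices computed on the original string followed by a single rebuild pass (simpler
-- decomposition, same return value).

-- ===== PORT A =====
-- one iteration of A's loop body:
--   if txt.count(char) % 2: pos = txt.rfind(char); if pos > -1: txt = txt[:pos] + txt[pos:].replace(char, "\\" + char)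
def sanStepA (txt : List Char) (char : Char) : List Char :=
  if PySem.Chars.count txt [char] % 2 == 1 then
    let pos := PySem.Chars.rfind txt [char]
    if pos > -1 then
      PySem.Chars.slice txt none (some pos) ++
        PySem.Chars.replace (PySem.Chars.slice txt (some pos) none) [char] ('\\' :: [char])
    else txt
  else txt

def sanitize_md (txt : String) : String :=
  String.ofList (List.foldl sanStepA txt.toList ['_', '*', '`'])

-- ===== PORT B =====
-- esc = {txt.rfind(c) for c in "_*`" if txt.count(c) % 2}
-- return "".join("\\" + ch if i in esc else ch for i, ch in enumerate(txt))
def sanitize_md_alt (txt : String) : String :=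
  let cs := txt.toList
  let esc : PySem.Set Int := PySem.Set.ofList
    ((['_', '*', '`'].filter (fun c => PySem.Chars.count cs [c] % 2 == 1)).map
      (fun c => PySem.Chars.rfind cs [c]))
  String.ofList ((PySem.List.enumerate cs 0).flatMap
    (fun p => if p.1 ∈ esc then '\\' :: [p.2] else [p.2]))

-- ===== PRECONDITION & SPEC =====
def Spec_sanitize_md (txt : String) (out : String) : Prop := out = sanitize_md_alt txt
instance (txt : String) (out : String) : Decidable (Spec_sanitize_md txt out) := by unfold Spec_sanitize_md; infer_instance

-- ===== CLAIM (what is proved, stated in full; the proofs are below) =====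
def Claim_equal_sanitize_md : Prop := ∀ (txt : String), Dom_sanitize_md txt → Spec_sanitize_md txt (sanitize_md txt)

-- ===== LEMMAS AND PROOFS =====

-- insert '\\' before every position i of cs with f i = true (proof-side model of both programs)
def pvIns (f : Nat → Bool) : List Char → List Char
  | [] => []
  | x :: t => (if f 0 then ['\\', x] else [x]) ++ pvIns (fun n => f (n + 1)) t

-- the list B builds its escape set from
def escOf (chars cs : List Char) : List Int :=
  (chars.filter (fun c => PySem.Chars.count cs [c] % 2 == 1)).map
    (fun c => PySem.Chars.rfind cs [c])

theorem pvIns_false : ∀ cs, pvIns (fun _ => false) cs = cs := by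
  intro cs; induction cs with
  | nil => rfl
  | cons x t ih => simp [pvIns, ih]

theorem pvIns_congr : ∀ (cs : List Char) (f g : Nat → Bool),
    (∀ i, i < cs.length → f i = g i) → pvIns f cs = pvIns g cs := by
  intro cs; induction cs with
  | nil => intro f g _; rfl
  | cons x t ih =>
    intro f g h
    simp only [pvIns, h 0 (by simp)]
    rw [ih (fun n => f (n + 1)) (fun n => g (n + 1)) (fun i hi => h (i + 1) (by simpa using hi))]

theorem pvIns_append : ∀ (u v : List Char) (f : Nat → Bool),
    pvIns f (u ++ v) = pvIns f u ++ pvIns (fun n => f (n + u.length)) v := by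
  intro u; induction u with
  | nil => intro v f; simp [pvIns]
  | cons x t ih =>
    intro v f
    rw [List.cons_append]
    simp only [pvIns, ih, List.append_assoc]
    have h2 : pvIns (fun n => f (n + t.length + 1)) v
        = pvIns (fun n => f (n + (x :: t).length)) v := by
      apply pvIns_congr; intro i _
      exact congrArg f (by rw [List.length_cons, Nat.add_assoc])
    rw [h2]

theorem count_pvIns (c : Char) (hc : c ≠ '\\') : ∀ (cs : List Char) (f : Nat → Bool),
    (pvIns f cs).count c = cs.count c := by
  intro cs; induction cs with
  | nil => intro f; rfl
  | cons x t ih =>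
    intro f
    by_cases h : f 0 = true <;>
      simp [pvIns, h, ih, List.count_cons, Ne.symm hc]

theorem not_mem_pvIns (c : Char) (hc : c ≠ '\\') : ∀ (cs : List Char) (f : Nat → Bool),
    c ∉ cs → c ∉ pvIns f cs := by
  intro cs; induction cs with
  | nil => intro f _; simp [pvIns]
  | cons x t ih =>
    intro f h
    simp only [List.mem_cons, not_or] at h
    by_cases h0 : f 0 = true <;> simp [pvIns, h0, hc, h.1, ih _ h.2]

theorem flatMap_enum (esc : List Int) : ∀ (cs : List Char) (s : Int),
    (PySem.List.enumerate cs s).flatMap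
        (fun p => if p.1 ∈ esc then '\\' :: [p.2] else [p.2])
      = pvIns (fun n => decide ((s + (n : Int)) ∈ esc)) cs := by
  intro cs; induction cs with
  | nil => intro s; simp [PySem.List.enumerate_nil, pvIns]
  | cons x t ih =>
    intro s
    rw [PySem.List.enumerate_cons]
    simp only [List.flatMap_cons, ih (s + 1), pvIns]
    congr 1
    · by_cases h : s ∈ esc <;> simp [h]
    · apply pvIns_congr
      intro i _
      congr 2
      push_cast
      ring

theorem isPrefixOf_single_mem {c : Char} {xs : List Char}
    (h : List.isPrefixOf [c] xs = true) : c ∈ xs := by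
  cases xs with
  | nil => simp [List.isPrefixOf] at h
  | cons y t =>
    simp only [List.isPrefixOf, Bool.and_eq_true, beq_iff_eq] at h
    simp [h.1]

theorem count_go_eq (c : Char) : ∀ (cs : List Char) (fuel acc : Nat), cs.length ≤ fuel →
    PySem.Chars.count.go [c] fuel cs acc = acc + cs.count c := by
  intro cs; induction cs with
  | nil =>
    intro fuel acc _
    cases fuel <;> simp [PySem.Chars.count.go]
  | cons x t ih =>
    intro fuel acc hf
    cases fuel with
    | zero => simp at hf
    | succ m =>
      rw [PySem.Chars.count.go]
      by_cases hx : x = c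
      · subst hx
        simp only [List.isPrefixOf, Bool.and_true, beq_self_eq_true,
          if_true, List.length_cons, List.length_nil, Nat.zero_add, List.drop_succ_cons,
          List.drop_zero]
        rw [ih m (acc + 1) (by simpa using hf)]
        simp; omega
      · have : ([c].isPrefixOf (x :: t)) = false := by
          simp [List.isPrefixOf]; exact fun h => absurd h.symm hx
        rw [this]
        simp only [Bool.false_eq_true, if_false]
        rw [ih m acc (by simpa using hf)]
        simp [hx]

theorem chars_count_single (cs : List Char) (c : Char) :
    PySem.Chars.count cs [c] = cs.count c := by
  rw [PySem.Chars.count]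
  simp only [List.isEmpty_cons, if_false, Bool.false_eq_true]
  simpa using count_go_eq c cs cs.length 0 le_rfl

theorem rfind_go_last (c : Char) (u v : List Char) (hv : c ∉ v) :
    ∀ n, u.length ≤ n → PySem.Chars.rfind.go (u ++ c :: v) [c] n = (u.length : Int) := by
  intro n
  induction n with
  | zero =>
    intro h
    have hu : u = [] := by simpa using List.length_eq_zero_iff.mp (Nat.le_zero.mp h)
    subst hu
    rw [PySem.Chars.rfind.go]
    simp [List.isPrefixOf]
  | succ m ih =>
    intro h
    rw [PySem.Chars.rfind.go]
    by_cases he : u.length = m + 1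
    · have : List.drop (m + 1) (u ++ c :: v) = c :: v := by
        rw [← he]; simp
      rw [this]
      simp [List.isPrefixOf, he]
    · have hlt : u.length ≤ m := by omega
      have hdrop : List.drop (m + 1) (u ++ c :: v) = List.drop (m - u.length) v := by
        rw [List.drop_append]
        rw [List.drop_eq_nil_of_le (by omega : u.length ≤ m + 1)]
        have h2 : m + 1 - u.length = (m - u.length) + 1 := by omega
        rw [h2, List.nil_append, List.drop_succ_cons]
      have hpf : List.isPrefixOf [c] (List.drop (m + 1) (u ++ c :: v)) = false := by
        rw [hdrop]
        by_contra hne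
        have := isPrefixOf_single_mem (by simpa using hne)
        exact hv (List.mem_of_mem_drop this)
      rw [hpf]
      simp only [Bool.false_eq_true, if_false]
      exact ih hlt

theorem rfind_last (c : Char) (u v : List Char) (hv : c ∉ v) :
    PySem.Chars.rfind (u ++ c :: v) [c] = (u.length : Int) := by
  rw [PySem.Chars.rfind]
  exact rfind_go_last c u v hv _ (by simp)

theorem replace_go_no (c : Char) (new : List Char) :
    ∀ (fuel : Nat) (l acc : List Char), c ∉ l →
      PySem.Chars.replace.go [c] new fuel l acc = acc.reverse ++ l := by
  intro fuel
  induction fuel with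
  | zero => intro l acc _; rw [PySem.Chars.replace.go]
  | succ m ih =>
    intro l acc hl
    cases l with
    | nil => simp [PySem.Chars.replace.go]
    | cons x t =>
      simp only [List.mem_cons, not_or] at hl
      rw [PySem.Chars.replace.go]
      have : List.isPrefixOf [c] (x :: t) = false := by
        simp only [List.isPrefixOf, Bool.and_true]
        exact beq_eq_false_iff_ne.mpr hl.1
      rw [this]
      simp only [Bool.false_eq_true, if_false]
      rw [ih t (x :: acc) hl.2]
      simp

theorem replace_single (c : Char) (v : List Char) (hv : c ∉ v) :
    PySem.Chars.replace (c :: v) [c] ['\\', c] = '\\' :: c :: v := by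
  have h1 : PySem.Chars.replace.go [c] ['\\', c] (v.length + 1) (c :: v) []
      = '\\' :: c :: v := by
    rw [PySem.Chars.replace.go]
    simp only [List.isPrefixOf, Bool.and_true, beq_self_eq_true, if_true,
      List.length_cons, List.length_nil, List.drop_succ_cons, List.drop_zero]
    rw [replace_go_no c ['\\', c] v.length v _ hv]
    simp
  rw [PySem.Chars.replace]
  simp only [List.isEmpty_cons, if_false, Bool.false_eq_true, List.length_cons]
  exact h1

theorem sanStepA_odd (c : Char) (u v : List Char) (hv : c ∉ v)
    (hodd : (u ++ c :: v).count c % 2 = 1) :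
    sanStepA (u ++ c :: v) c = u ++ '\\' :: c :: v := by
  rw [sanStepA]
  rw [chars_count_single, hodd]
  simp only [beq_self_eq_true, if_true]
  rw [rfind_last c u v hv]
  rw [if_pos (by omega : (u.length : Int) > -1)]
  simp only [PySem.Chars.slice, PySem.List.slice_to_natCast, PySem.List.slice_from_natCast]
  rw [List.take_left, List.drop_left, replace_single c v hv]

theorem sanStepA_even (c : Char) (cs : List Char) (h : ¬ cs.count c % 2 = 1) :
    sanStepA cs c = cs := by
  rw [sanStepA, chars_count_single]
  simp [h]

theorem exists_last (c : Char) : ∀ cs : List Char, c ∈ cs →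
    ∃ u v, cs = u ++ c :: v ∧ c ∉ v := by
  intro cs; induction cs with
  | nil => intro h; simp at h
  | cons x t ih =>
    intro h
    by_cases ht : c ∈ t
    · obtain ⟨u, v, rfl, hv⟩ := ih ht
      exact ⟨x :: u, v, by simp, hv⟩
    · have hx : x = c := by
        rcases List.mem_cons.mp h with h1 | h1
        · exact h1.symm
        · exact absurd h1 ht
      exact ⟨[], t, by simp [hx], ht⟩

theorem inv_main : ∀ (chars : List Char) (cs : List Char) (f : Nat → Bool),
    (∀ c ∈ chars, c ≠ '\\') → chars.Nodup →
    (∀ c ∈ chars, ∀ i, f i = true → cs[i]? ≠ some c) →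
    List.foldl sanStepA (pvIns f cs) chars
      = pvIns (fun i => f i || decide ((i : Int) ∈ escOf chars cs)) cs := by
  intro chars
  induction chars with
  | nil =>
    intro cs f _ _ _
    simp only [List.foldl_nil]
    apply pvIns_congr; intro i _; simp [escOf]
  | cons c0 rest ih =>
    intro cs f hbs hnd hf
    have hc0 : c0 ≠ '\\' := hbs c0 (by simp)
    simp only [List.foldl_cons]
    by_cases hodd : cs.count c0 % 2 = 1
    · -- c0 has odd count: A escapes its last occurrence
      have hmem : c0 ∈ cs := by
        rcases Nat.eq_zero_or_pos (cs.count c0) with h0 | hpos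
        · rw [h0] at hodd; simp at hodd
        · exact List.count_pos_iff.mp hpos
      obtain ⟨u, v, hcs, hv⟩ := exists_last c0 cs hmem
      subst hcs
      have hget : (u ++ c0 :: v)[u.length]? = some c0 := by
        rw [List.getElem?_append_right le_rfl]
        simp
      have hfp : f u.length = false := by
        by_contra hfp
        exact (hf c0 (by simp) u.length (by simpa using hfp)) hget
      -- decompose pvIns f cs around the last c0
      have hdec : pvIns f (u ++ c0 :: v)
          = pvIns f u ++ c0 :: pvIns (fun n => f (n + 1 + u.length)) v := by
        rw [pvIns_append]
        simp only [pvIns, Nat.zero_add, hfp, Bool.false_eq_true, if_false, List.singleton_append]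
      have hstep : sanStepA (pvIns f (u ++ c0 :: v)) c0
          = pvIns f u ++ '\\' :: c0 :: pvIns (fun n => f (n + 1 + u.length)) v := by
        rw [hdec]
        apply sanStepA_odd c0 _ _ (not_mem_pvIns c0 hc0 v _ hv)
        have : (pvIns f u ++ c0 :: pvIns (fun n => f (n + 1 + u.length)) v)
            = pvIns f (u ++ c0 :: v) := hdec.symm
        rw [this, count_pvIns c0 hc0]
        exact hodd
      rw [hstep]
      -- the escaped string is pvIns g cs for g := f with position u.length set
      have hg : pvIns f u ++ '\\' :: c0 :: pvIns (fun n => f (n + 1 + u.length)) v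
          = pvIns (fun i => f i || i == u.length) (u ++ c0 :: v) := by
        have hu : pvIns (fun i => f i || i == u.length) u = pvIns f u := by
          apply pvIns_congr; intro i hi
          have hne : (i == u.length) = false := by rw [beq_eq_false_iff_ne]; omega
          simp [hne]
        have hvv : pvIns (fun n => f (n + 1 + u.length) || (n + 1 + u.length == u.length)) v
            = pvIns (fun n => f (n + 1 + u.length)) v := by
          apply pvIns_congr; intro i _
          have hne : (i + 1 + u.length == u.length) = false := by
            rw [beq_eq_false_iff_ne]; omega
          simp [hne]
        have h0 : (f u.length || (u.length == u.length)) = true := by simp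
        rw [pvIns_append]
        simp only [pvIns, Nat.zero_add]
        rw [h0, hu, hvv]
        simp
      rw [hg]
      rw [ih (u ++ c0 :: v) (fun i => f i || i == u.length)
        (fun c hc => hbs c (by simp [hc])) (List.nodup_cons.mp hnd).2 ?hrest]
      case hrest =>
        intro c hc i hi
        have hi' := hi
        rw [Bool.or_eq_true] at hi'
        rcases hi' with h1 | h1
        · exact hf c (by simp [hc]) i h1
        · have : i = u.length := by simpa using h1
          subst this
          rw [hget]
          intro hcon
          have : c0 = c := by injection hcon
          exact (List.nodup_cons.mp hnd).1 (this ▸ hc)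
      -- identify the mark with membership in escOf (c0 :: rest)
      apply pvIns_congr
      intro i _
      have hesc : escOf (c0 :: rest) (u ++ c0 :: v)
          = (u.length : Int) :: escOf rest (u ++ c0 :: v) := by
        rw [escOf, List.filter_cons]
        rw [if_pos (by rw [chars_count_single, hodd]; rfl)]
        rw [List.map_cons, rfind_last c0 u v hv]
        rfl
      rw [hesc]
      by_cases h2 : i = u.length
      · subst h2; simp
      · have hb : (i == u.length) = false := beq_eq_false_iff_ne.mpr h2
        simp [List.mem_cons, hb, h2, Nat.cast_inj]
    · -- c0 has even count: A leaves the string unchanged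
      have : sanStepA (pvIns f cs) c0 = pvIns f cs := by
        apply sanStepA_even
        rw [count_pvIns c0 hc0]
        exact hodd
      rw [this]
      rw [ih cs f (fun c hc => hbs c (by simp [hc])) (List.nodup_cons.mp hnd).2
        (fun c hc => hf c (by simp [hc]))]
      apply pvIns_congr
      intro i _
      have hesc : escOf (c0 :: rest) cs = escOf rest cs := by
        rw [escOf, List.filter_cons]
        rw [if_neg (by rw [chars_count_single]; simpa using hodd)]
        rfl
      rw [hesc]

-- ===== VERDICT (by name: the statement is the Claim_ definition above) =====
theorem sanitize_md_spec : Claim_equal_sanitize_md := by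
  intro txt _
  unfold Spec_sanitize_md sanitize_md sanitize_md_alt
  congr 1
  have hA : List.foldl sanStepA txt.toList ['_', '*', '`']
      = pvIns (fun i => (fun _ => false) i ||
          decide ((i : Int) ∈ escOf ['_', '*', '`'] txt.toList)) txt.toList := by
    rw [← pvIns_false txt.toList]
    rw [inv_main ['_', '*', '`'] txt.toList (fun _ => false)
      (by intro c hc; fin_cases hc <;> simp) (by simp)
      (by intro c _ i hi; simp at hi)]
    rw [pvIns_false]
  rw [hA]
  rw [flatMap_enum]
  apply pvIns_congr
  intro i _
  simp only [Bool.false_or, zero_add]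
  congr 1
  rw [PySem.Set.mem_ofList]
  rfl
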